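-- pv_equiv track=rewrite | github.com/tandyx/mbtamapper | shared_code/color_mapping.py | return_delay_colors
-- ===== SOURCE A (Python) =====
-- def return_delay_colors(delay: int) -> str:
--     """Returns a color based on the delay.
--
--     Args:
--         delay (int): delay in minutes
--     Returns:
--         str: color
--     """
--
--     delay_dict = {
--         "#ffff00": 5 <= delay < 10,
--         "#ff0000": 10 <= delay < 15,
--         "#800000": delay >= 15,
--     }
--
--     for color, condition in delay_dict.items():
--         if condition:
--             return color
--
--     return "#ffffff"
-- ===== SOURCE B (Python) =====
-- import bisect
--
-- _THRESHOLDS = [5, 10, 15]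
-- _COLORS = ["#ffffff", "#ffff00", "#ff0000", "#800000"]
--
-- def return_delay_colors(delay: int) -> str:
--     """Returns a color based on the delay (table lookup via bisect)."""
--     return _COLORS[bisect.bisect_right(_THRESHOLDS, delay)]
-- ===== Notes on version B (the rewrite author's own statement) =====
-- stated objective: idiomatic
-- what changed: Replaced the dict of three pre-evaluated range conditions scanned in a loop by a sorted threshold table [5,10,15] indexed with bisect.bisect_right into a parallel color list.
import Mathlib
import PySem

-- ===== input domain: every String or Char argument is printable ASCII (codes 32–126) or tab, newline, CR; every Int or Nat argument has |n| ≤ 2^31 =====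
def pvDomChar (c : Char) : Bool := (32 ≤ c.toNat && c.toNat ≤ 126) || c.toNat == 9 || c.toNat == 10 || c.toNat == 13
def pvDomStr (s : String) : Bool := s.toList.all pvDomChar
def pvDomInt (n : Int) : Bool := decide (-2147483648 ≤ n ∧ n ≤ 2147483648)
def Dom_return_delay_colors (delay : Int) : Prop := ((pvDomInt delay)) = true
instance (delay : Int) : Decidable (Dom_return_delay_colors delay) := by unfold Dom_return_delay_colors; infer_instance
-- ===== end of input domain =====

-- B replaces A's dict of three pre-evaluated range conditions scanned in a loop by a
-- bisect_right lookup into a sorted threshold table with a parallel color list (idiomatic).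

-- ===== PORT A =====
-- the 'for color, condition in delay_dict.items(): if condition: return color' loop
def pvFirstTrue : List (String × Bool) → String
  | [] => "#ffffff"
  | (color, condition) :: rest => if condition then color else pvFirstTrue rest

def return_delay_colors (delay : Int) : String :=
  let delay_dict : PySem.Dict String Bool :=
    ((PySem.Dict.empty.insert "#ffff00" (decide (5 ≤ delay ∧ delay < 10))).insert
        "#ff0000" (decide (10 ≤ delay ∧ delay < 15))).insert
      "#800000" (decide (15 ≤ delay))
  pvFirstTrue delay_dict.items

-- ===== PORT B =====
def pvThresholds : List Int := [5, 10, 15]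
def pvColors : List String := ["#ffffff", "#ffff00", "#ff0000", "#800000"]

def return_delay_colors_alt (delay : Int) : String :=
  (PySem.List.pyGet? pvColors ((PySem.List.bisectRight pvThresholds delay : Nat) : Int)).getD ""

-- ===== PRECONDITION & SPEC =====
def Spec_return_delay_colors (delay : Int) (out : String) : Prop := out = return_delay_colors_alt delay
instance (delay : Int) (out : String) : Decidable (Spec_return_delay_colors delay out) := by unfold Spec_return_delay_colors; infer_instance

-- ===== CLAIM (what is proved, stated in full; the proofs are below) =====
def Claim_equal_return_delay_colors : Prop := ∀ (delay : Int), Dom_return_delay_colors delay → Spec_return_delay_colors delay (return_delay_colors delay)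

-- ===== LEMMAS AND PROOFS =====

-- ===== VERDICT (by name: the statement is the Claim_ definition above) =====
theorem return_delay_colors_spec : Claim_equal_return_delay_colors := by
  intro delay _
  unfold Spec_return_delay_colors return_delay_colors return_delay_colors_alt
  rcases Int.lt_or_le delay 5 with h5 | h5
  · simp [pvFirstTrue, pvThresholds, pvColors, PySem.List.bisectRight,
      PySem.List.bisectRightLoop, PySem.List.pyGet?, PySem.List.pyIdx?, PySem.Dict.insert, PySem.Dict.empty, PySem.Dict.items,
      show ¬ (5 : Int) ≤ delay by omega, show delay < 5 from h5,
      show delay < 10 by omega, show delay < 15 by omega, show ¬ (10 : Int) ≤ delay by omega, show ¬ (15 : Int) ≤ delay by omega]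
  · rcases Int.lt_or_le delay 10 with h10 | h10
    · simp [pvFirstTrue, pvThresholds, pvColors, PySem.List.bisectRight,
        PySem.List.bisectRightLoop, PySem.List.pyGet?, PySem.List.pyIdx?, PySem.Dict.insert, PySem.Dict.empty, PySem.Dict.items,
        show (5 : Int) ≤ delay from h5, show ¬ delay < 5 by omega,
        show delay < 10 from h10, show delay < 15 by omega, show ¬ (10 : Int) ≤ delay by omega, show ¬ (15 : Int) ≤ delay by omega]
    · rcases Int.lt_or_le delay 15 with h15 | h15
      · simp [pvFirstTrue, pvThresholds, pvColors, PySem.List.bisectRight,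
          PySem.List.bisectRightLoop, PySem.List.pyGet?, PySem.List.pyIdx?, PySem.Dict.insert, PySem.Dict.empty, PySem.Dict.items,
          show (10 : Int) ≤ delay from h10, show ¬ delay < 10 by omega,
          show ¬ ((5 : Int) ≤ delay ∧ delay < 10) by omega,
          show delay < 15 from h15, show ¬ (15 : Int) ≤ delay by omega]
      · simp [pvFirstTrue, pvThresholds, pvColors, PySem.List.bisectRight,
          PySem.List.bisectRightLoop, PySem.List.pyGet?, PySem.List.pyIdx?, PySem.Dict.insert, PySem.Dict.empty, PySem.Dict.items,
          show (15 : Int) ≤ delay from h15, show ¬ delay < 15 by omega,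
          show ¬ delay < 10 by omega,
          show ¬ ((5 : Int) ≤ delay ∧ delay < 10) by omega,
          show ¬ ((10 : Int) ≤ delay ∧ delay < 15) by omega]
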